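-- pv_equiv track=rewrite | github.com/MrBrantCode/unitest_baseline | mut_generate/mist_train_taco/taco_17739/solution.py | count_group_distributions
-- ===== SOURCE A (Python) =====
-- def count_group_distributions(N: int, K: int, A: list) -> int:
--     MOD = 1000000007
--
--     # Initialize the found array and Kplus
--     found = [0] * K
--     found[0] = 1
--     Kplus = 0
--
--     # Early exit if the total sum is less than 2*K
--     if sum(A) < 2 * K:
--         return 0
--
--     # Process each integer in A
--     for a in A:
--         Kplus = (Kplus * 2) % MOD
--         for j in range(max(0, K - a), K):
--             Kplus = (Kplus + found[j]) % MOD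
--
--         for j in range(K - 1, a - 1, -1):
--             found[j] = (found[j] + found[j - a]) % MOD
--
--     # Calculate the final result
--     result = (MOD + Kplus - sum(found) % MOD) % MOD
--     return result
-- ===== SOURCE B (Python) =====
-- def count_group_distributions(N: int, K: int, A: list) -> int:
--     MOD = 1000000007
--     found = [0] * K
--     found[0] = 1
--     if sum(A) < 2 * K:
--         return 0
--     # plain 0/1-knapsack subset-sum counts capped below K
--     for a in A:
--         for j in range(K - 1, a - 1, -1):
--             found[j] = (found[j] + found[j - a]) % MOD
--     # closed form: A's running accumulator always equals 2^n - sum(found) (mod MOD)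
--     return (pow(2, len(A), MOD) - 2 * (sum(found) % MOD)) % MOD
-- ===== Notes on version B (the rewrite author's own statement) =====
-- stated objective: simpler
-- what changed: Removes A's interleaved accumulator machinery (the per-element doubling of Kplus and the whole inner range-sum loop over found) and instead derives the result in closed form as pow(2,len(A),MOD) - 2*sum(found) after a plain 0/1-knapsack pass.
import Mathlib
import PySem

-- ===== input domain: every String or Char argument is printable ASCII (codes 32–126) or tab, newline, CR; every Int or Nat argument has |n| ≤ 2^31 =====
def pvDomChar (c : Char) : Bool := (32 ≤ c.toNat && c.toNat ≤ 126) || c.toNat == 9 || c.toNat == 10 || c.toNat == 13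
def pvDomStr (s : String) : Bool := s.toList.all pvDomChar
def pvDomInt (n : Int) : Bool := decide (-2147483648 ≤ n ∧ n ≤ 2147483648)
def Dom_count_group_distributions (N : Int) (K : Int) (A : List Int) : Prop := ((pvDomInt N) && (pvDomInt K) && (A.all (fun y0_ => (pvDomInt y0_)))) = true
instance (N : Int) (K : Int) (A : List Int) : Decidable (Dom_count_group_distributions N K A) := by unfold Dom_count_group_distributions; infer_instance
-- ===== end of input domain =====

-- B drops A's interleaved accumulator (the Kplus doubling and its inner range-sum loop) and instead
-- derives the result in closed form from pow(2, len(A), MOD) after the plain knapsack pass.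

-- ===== PORT A =====
-- the downward 0/1-knapsack update loop `for j in range(K-1, a-1, -1): found[j] = (found[j]+found[j-a]) % MOD`
-- (this literal loop occurs verbatim in both Pythons, so both ports use this helper)
def cgdKnap (K : Int) (a : Int) (f : List Int) : List Int :=
  (PySem.List.pyRange (K - 1) (a - 1) (-1)).foldl
    (fun g j => PySem.List.pySetD g j
      (PySem.Int.mod (PySem.List.pyGetD g j 0 + PySem.List.pyGetD g (j - a) 0) 1000000007)) f

-- `found = [0]*K; found[0] = 1` (identical initialization in both Pythons)
def cgdInit (K : Int) : List Int :=
  PySem.List.pySetD (List.replicate K.toNat (0 : Int)) 0 1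

-- body of A's `for a in A:` loop on the state (Kplus, found)
def cgdStep (K : Int) (st : Int × List Int) (a : Int) : Int × List Int :=
  let kp1 := PySem.Int.mod (st.1 * 2) 1000000007
  let kp2 := (PySem.List.pyRange (max 0 (K - a)) K 1).foldl
      (fun kp j => PySem.Int.mod (kp + PySem.List.pyGetD st.2 j 0) 1000000007) kp1
  (kp2, cgdKnap K a st.2)

def count_group_distributions (N : Int) (K : Int) (A : List Int) : Int :=
  let found := cgdInit K
  if A.sum < 2 * K then 0
  else
    let st := A.foldl (cgdStep K) (0, found)
    PySem.Int.mod (1000000007 + st.1 - PySem.Int.mod st.2.sum 1000000007) 1000000007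

-- ===== PORT B =====
def count_group_distributions_alt (N : Int) (K : Int) (A : List Int) : Int :=
  let found := cgdInit K
  if A.sum < 2 * K then 0
  else
    let f := A.foldl (fun g a => cgdKnap K a g) found
    PySem.Int.mod (PySem.Int.powMod 2 A.length 1000000007 - 2 * PySem.Int.mod f.sum 1000000007) 1000000007

-- ===== PRECONDITION & SPEC =====
-- Pre_ excludes exactly the inputs where the Python A raises IndexError: K ≤ 0 (found[0] = 1 on a
-- list of length ≤ 0), and a negative element reached by the main loop (the knapsack update then
-- reads found[j - a] past the end of found). A returns normally on every other input.
def Pre_count_group_distributions (N : Int) (K : Int) (A : List Int) : Prop :=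
  1 ≤ K ∧ (A.sum < 2 * K ∨ ∀ a ∈ A, 0 ≤ a)
instance (N : Int) (K : Int) (A : List Int) : Decidable (Pre_count_group_distributions N K A) := by
  unfold Pre_count_group_distributions; infer_instance

def pvWitness_count_group_distributions : Int × Int × List Int := (3, 1, [1, 1])

def Spec_count_group_distributions (N : Int) (K : Int) (A : List Int) (out : Int) : Prop := out = count_group_distributions_alt N K A
instance (N : Int) (K : Int) (A : List Int) (out : Int) : Decidable (Spec_count_group_distributions N K A out) := by unfold Spec_count_group_distributions; infer_instance

-- ===== CLAIM (what is proved, stated in full; the proofs are below) =====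
def Claim_equal_count_group_distributions : Prop := ∀ (N : Int) (K : Int) (A : List Int), Dom_count_group_distributions N K A → Pre_count_group_distributions N K A → Spec_count_group_distributions N K A (count_group_distributions N K A)

-- ===== LEMMAS AND PROOFS =====

theorem pm_eq (x : Int) : PySem.Int.mod x 1000000007 = x % 1000000007 := by
  unfold PySem.Int.mod; simp [Int.fmod_eq_emod]

theorem sum_set_int (l : List Int) (n : Nat) (v : Int) (h : n < l.length) :
    (l.set n v).sum = l.sum + v - l[n] := by
  rw [List.sum_set]
  have h1 := List.sum_take_add_sum_drop l (n+1)
  have h2 := List.sum_take_succ l n h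
  simp only [if_pos h]
  omega

-- A's Kplus inner accumulation loop, over any index list
theorem fold_mod_add (g : Int → Int) (L : List Int) : ∀ (kp : Int), 0 ≤ kp → kp < 1000000007 →
    0 ≤ L.foldl (fun s j => (s + g j) % 1000000007) kp ∧
    L.foldl (fun s j => (s + g j) % 1000000007) kp < 1000000007 ∧
    (L.foldl (fun s j => (s + g j) % 1000000007) kp) % 1000000007
      = (kp + (L.map g).sum) % 1000000007 := by
  induction L with
  | nil =>
    intro kp h0 h1
    exact ⟨h0, h1, by simp [Int.emod_eq_of_lt h0 h1]⟩
  | cons x xs ih =>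
    intro kp h0 h1
    simp only [List.foldl_cons, List.map_cons, List.sum_cons]
    obtain ⟨a1, a2, a3⟩ := ih ((kp + g x) % 1000000007)
      (Int.emod_nonneg _ (by norm_num)) (Int.emod_lt_of_pos _ (by norm_num))
    refine ⟨a1, a2, ?_⟩
    rw [a3]; omega

-- sum of f's values over pyRange lo len 1 = sum of the suffix of f from lo
theorem sum_getD_range (f : List Int) : ∀ (m : Nat) (lo : Int), 0 ≤ lo →
    m = ((f.length : Int) - lo).toNat →
    ((PySem.List.pyRange lo (f.length : Int) 1).map (fun j => PySem.List.pyGetD f j 0)).sum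
      = (f.drop lo.toNat).sum := by
  intro m
  induction m with
  | zero =>
    intro lo h0 hm
    rw [PySem.List.pyRange_one_eq_nil (by omega), List.drop_eq_nil_of_le (by omega)]
    simp
  | succ n ih =>
    intro lo h0 hm
    have hlt : lo < (f.length : Int) := by omega
    rw [PySem.List.pyRange_one_cons hlt]
    have hl : lo.toNat < f.length := by omega
    rw [List.drop_eq_getElem_cons hl]
    simp only [List.map_cons, List.sum_cons]
    rw [PySem.List.pyGetD_eq_getElem f 0 h0 hlt, ih (lo + 1) (by omega) (by omega)]
    have : (lo + 1).toNat = lo.toNat + 1 := by omega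
    rw [this]

-- partial downward knapsack fold: entries below the cursor still hold f's original values,
-- the sum has gained the (mod-reduced) low prefix of f
theorem knap_partial (a : Int) (ha : 0 ≤ a) (f : List Int) :
    ∀ (m : Nat) (c : Int) (g : List Int) (hc : c < (f.length : Int)) (hac : a - 1 ≤ c)
    (hm : m = (c - (a - 1)).toNat)
    (hlen : g.length = f.length) (hb : ∀ x ∈ g, 0 ≤ x ∧ x < 1000000007)
    (hag : ∀ i : Nat, (i : Int) ≤ c → (hi : i < f.length) → g[i]'(by omega) = f[i])
    (hfb : ∀ x ∈ f, 0 ≤ x ∧ x < 1000000007),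
    ((PySem.List.pyRange c (a - 1) (-1)).foldl
      (fun g j => PySem.List.pySetD g j
        (PySem.Int.mod (PySem.List.pyGetD g j 0 + PySem.List.pyGetD g (j - a) 0) 1000000007)) g).length = f.length ∧
    (∀ x ∈ (PySem.List.pyRange c (a - 1) (-1)).foldl
      (fun g j => PySem.List.pySetD g j
        (PySem.Int.mod (PySem.List.pyGetD g j 0 + PySem.List.pyGetD g (j - a) 0) 1000000007)) g, 0 ≤ x ∧ x < 1000000007) ∧
    ((PySem.List.pyRange c (a - 1) (-1)).foldl
      (fun g j => PySem.List.pySetD g j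
        (PySem.Int.mod (PySem.List.pyGetD g j 0 + PySem.List.pyGetD g (j - a) 0) 1000000007)) g).sum % 1000000007
      = (g.sum + (f.take (c + 1 - a).toNat).sum) % 1000000007 := by
  intro m
  induction m with
  | zero =>
    intro c g hc hac hm hlen hb hag hfb
    have : c ≤ a - 1 := by omega
    rw [PySem.List.pyRange_neg_one_eq_nil this]
    have : (c + 1 - a).toNat = 0 := by omega
    rw [this]
    simpa using ⟨hlen, hb⟩
  | succ n ih =>
    intro c g hc hac hm hlen hb hag hfb
    have hca : a - 1 < c := by omega
    have hc0 : 0 ≤ c := by omega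
    rw [PySem.List.pyRange_neg_one_cons hca]
    simp only [List.foldl_cons]
    have hcl : c.toNat < g.length := by omega
    have hgc : PySem.List.pyGetD g c 0 = f[c.toNat]'(by omega) := by
      rw [PySem.List.pyGetD_eq_getElem g 0 hc0 (by omega)]
      exact hag c.toNat (by omega) (by omega)
    have hgca : PySem.List.pyGetD g (c - a) 0 = f[(c - a).toNat]'(by omega) := by
      rw [PySem.List.pyGetD_eq_getElem g 0 (by omega) (by omega)]
      exact hag (c - a).toNat (by omega) (by omega)
    set v : Int := PySem.Int.mod (PySem.List.pyGetD g c 0 + PySem.List.pyGetD g (c - a) 0) 1000000007 with hv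
    have hvb : 0 ≤ v ∧ v < 1000000007 := by
      rw [hv, pm_eq]
      exact ⟨Int.emod_nonneg _ (by norm_num), Int.emod_lt_of_pos _ (by norm_num)⟩
    have hset : PySem.List.pySetD g c v = g.set c.toNat v :=
      PySem.List.pySetD_of_nonneg g v hc0
    rw [hset]
    have hlen' : (g.set c.toNat v).length = f.length := by simpa using hlen
    have hb' : ∀ x ∈ g.set c.toNat v, 0 ≤ x ∧ x < 1000000007 := by
      intro x hx
      rcases List.mem_or_eq_of_mem_set hx with h | h
      · exact hb x h
      · exact h ▸ hvb
    have hag' : ∀ i : Nat, (i : Int) ≤ c - 1 → (hi : i < f.length) →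
        (g.set c.toNat v)[i]'(by omega) = f[i] := by
      intro i hi hif
      rw [List.getElem_set_ne (by omega)]
      exact hag i (by omega) hif
    obtain ⟨r1, r2, r3⟩ := ih (c - 1) (g.set c.toNat v) (by omega) (by omega) (by omega)
      hlen' hb' hag' hfb
    refine ⟨r1, r2, ?_⟩
    rw [r3]
    have hsum : (g.set c.toNat v).sum = g.sum + v - f[c.toNat]'(by omega) := by
      rw [sum_set_int g c.toNat v hcl]
      rw [hag c.toNat (by omega) (by omega)]
    have hvmod : v % 1000000007
        = (f[c.toNat]'(by omega) + f[(c - a).toNat]'(by omega)) % 1000000007 := by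
      rw [hv, pm_eq, hgc, hgca]; omega
    have htake : (f.take (c + 1 - a).toNat).sum
        = (f.take (c - a).toNat).sum + f[(c - a).toNat]'(by omega) := by
      have h1 : (c + 1 - a).toNat = (c - a).toNat + 1 := by omega
      rw [h1, List.sum_take_succ f (c - a).toNat (by omega)]
    have h2 : (c - 1 + 1 - a).toNat = (c - a).toNat := by omega
    rw [h2, hsum, htake]
    omega

-- one knapsack pass: length and bounds preserved, sum gains the low prefix of f (mod)
theorem knap_inv (K a : Int) (hK : 1 ≤ K) (ha : 0 ≤ a) (f : List Int)
    (hlen : (f.length : Int) = K) (hfb : ∀ x ∈ f, 0 ≤ x ∧ x < 1000000007) :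
    (cgdKnap K a f).length = f.length ∧
    (∀ x ∈ cgdKnap K a f, 0 ≤ x ∧ x < 1000000007) ∧
    (cgdKnap K a f).sum % 1000000007
      = (f.sum + (f.take (K - a).toNat).sum) % 1000000007 := by
  unfold cgdKnap
  by_cases hKa : K ≤ a
  · rw [PySem.List.pyRange_neg_one_eq_nil (by omega)]
    have ht : (K - a).toNat = 0 := by omega
    rw [ht]
    simp only [List.foldl_nil, List.take_zero, List.sum_nil, add_zero]
    exact ⟨trivial, hfb, trivial⟩
  · have h := knap_partial a ha f (K - 1 - (a - 1)).toNat (K - 1) f (by omega) (by omega)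
      rfl rfl hfb (fun i _ _ => rfl) hfb
    have he : (K - 1 + 1 - a).toNat = (K - a).toNat := by omega
    rw [he] at h
    exact h

-- one iteration of A's main loop: Kplus + sum(found) doubles (mod)
theorem step_inv (K a : Int) (hK : 1 ≤ K) (ha : 0 ≤ a) (kp : Int) (f : List Int)
    (hlen : (f.length : Int) = K) (hfb : ∀ x ∈ f, 0 ≤ x ∧ x < 1000000007) :
    (cgdStep K (kp, f) a).2 = cgdKnap K a f ∧
    0 ≤ (cgdStep K (kp, f) a).1 ∧ (cgdStep K (kp, f) a).1 < 1000000007 ∧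
    ((cgdStep K (kp, f) a).1 + (cgdKnap K a f).sum) % 1000000007
      = (2 * (kp + f.sum)) % 1000000007 := by
  obtain ⟨kl, kb, ks⟩ := knap_inv K a hK ha f hlen hfb
  refine ⟨rfl, ?_⟩
  unfold cgdStep
  simp only [pm_eq]
  have hb1 : 0 ≤ (kp * 2) % 1000000007 := Int.emod_nonneg _ (by norm_num)
  have hb2 : (kp * 2) % 1000000007 < 1000000007 := Int.emod_lt_of_pos _ (by norm_num)
  obtain ⟨f1, f2, f3⟩ := fold_mod_add (fun j => PySem.List.pyGetD f j 0)
    (PySem.List.pyRange (max 0 (K - a)) K 1) ((kp * 2) % 1000000007) hb1 hb2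
  refine ⟨f1, f2, ?_⟩
  have hr : ((PySem.List.pyRange (max 0 (K - a)) K 1).map (fun j => PySem.List.pyGetD f j 0)).sum
      = (f.drop (max 0 (K - a)).toNat).sum := by
    have := sum_getD_range f ((f.length : Int) - max 0 (K - a)).toNat (max 0 (K - a))
      (by omega) rfl
    rw [hlen] at this
    exact this
  rw [hr] at f3
  have hsplit := List.sum_take_add_sum_drop f (K - a).toNat
  have hmx : (max 0 (K - a)).toNat = (K - a).toNat := by omega
  rw [hmx] at f3
  omega

-- the whole main loop: A's found equals B's found, and Kplus + sum(found) ≡ 2^n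
theorem fold_inv (K : Int) (hK : 1 ≤ K) : ∀ (A : List Int) (kp : Int) (f : List Int) (n : Nat)
    (hA : ∀ a ∈ A, 0 ≤ a) (hlen : (f.length : Int) = K)
    (hfb : ∀ x ∈ f, 0 ≤ x ∧ x < 1000000007) (h0 : 0 ≤ kp) (h1 : kp < 1000000007)
    (hinv : (kp + f.sum) % 1000000007 = (2 ^ n : Int) % 1000000007),
    (A.foldl (cgdStep K) (kp, f)).2 = A.foldl (fun g a => cgdKnap K a g) f ∧
    0 ≤ (A.foldl (cgdStep K) (kp, f)).1 ∧ (A.foldl (cgdStep K) (kp, f)).1 < 1000000007 ∧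
    ((A.foldl (cgdStep K) (kp, f)).1 + (A.foldl (cgdStep K) (kp, f)).2.sum) % 1000000007
      = (2 ^ (n + A.length) : Int) % 1000000007 := by
  intro A
  induction A with
  | nil => intro kp f n hA hlen hfb h0 h1 hinv; exact ⟨rfl, h0, h1, by simpa using hinv⟩
  | cons a as ih =>
    intro kp f n hA hlen hfb h0 h1 hinv
    have ha : 0 ≤ a := hA a (by simp)
    obtain ⟨kl, kb, ks⟩ := knap_inv K a hK ha f hlen hfb
    obtain ⟨e2, s0, s1, ssum⟩ := step_inv K a hK ha kp f hlen hfb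
    simp only [List.foldl_cons]
    have hstep : cgdStep K (kp, f) a = ((cgdStep K (kp, f) a).1, cgdKnap K a f) := by
      rw [← e2]
    rw [hstep]
    have hinv' : ((cgdStep K (kp, f) a).1 + (cgdKnap K a f).sum) % 1000000007
        = (2 ^ (n + 1) : Int) % 1000000007 := by
      rw [ssum]
      have : (2 ^ (n + 1) : Int) = 2 * 2 ^ n := by ring
      rw [this]
      omega
    have := ih (cgdStep K (kp, f) a).1 (cgdKnap K a f) (n + 1)
      (fun x hx => hA x (by simp [hx])) (by rw [kl]; exact hlen) kb s0 s1 hinv'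
    have harr : n + 1 + as.length = n + (as.length + 1) := by omega
    rw [harr] at this
    simpa using this

theorem init_facts (K : Int) (hK : 1 ≤ K) :
    ((cgdInit K).length : Int) = K ∧ (cgdInit K).sum = 1 ∧
    (∀ x ∈ cgdInit K, 0 ≤ x ∧ x < 1000000007) := by
  unfold cgdInit
  rw [PySem.List.pySetD_of_nonneg _ _ (by omega)]
  obtain ⟨m, hm⟩ : ∃ m, K.toNat = m + 1 := ⟨K.toNat - 1, by omega⟩
  rw [hm, List.replicate_succ]
  simp only [Int.toNat_zero, List.set_cons_zero]
  refine ⟨by simp only [List.length_cons, List.length_replicate]; omega, by simp [List.sum_replicate], ?_⟩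
  intro x hx
  rcases List.mem_cons.mp hx with h | h
  · omega
  · have := List.eq_of_mem_replicate h; omega

theorem main_eq (N K : Int) (A : List Int) (hK : 1 ≤ K)
    (hP : A.sum < 2 * K ∨ ∀ a ∈ A, 0 ≤ a) :
    count_group_distributions N K A = count_group_distributions_alt N K A := by
  unfold count_group_distributions count_group_distributions_alt
  by_cases hg : A.sum < 2 * K
  · simp [hg]
  · simp only [if_neg hg]
    have hA : ∀ a ∈ A, 0 ≤ a := hP.resolve_left hg
    obtain ⟨il, isum, ib⟩ := init_facts K hK
    obtain ⟨e2, k0, k1, kinv⟩ := fold_inv K hK A 0 (cgdInit K) 0 hA il ib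
      (by omega) (by norm_num) (by rw [isum]; norm_num)
    rw [e2] at kinv
    unfold PySem.Int.powMod
    simp only [pm_eq, Nat.zero_add] at kinv ⊢
    rw [e2]
    omega

-- ===== VERDICT (by name: the statement is the Claim_ definition above) =====
theorem count_group_distributions_spec : Claim_equal_count_group_distributions := by
  intro N K A _ hPre
  unfold Spec_count_group_distributions
  exact main_eq N K A hPre.1 hPre.2
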